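-- pv_equiv track=rewrite | github.com/teak421/CSA-Traffic-Diag-Tool | csa_traffic_diag.py | _parse_route_get_macos
-- ===== SOURCE A (Python) =====
-- def _parse_route_get_macos(output):
--     """Parse macOS `route get` output to extract interface and gateway."""
--     info = {"interface": None, "gateway": None, "flags": None, "raw": output}
--     for line in output.splitlines():
--         line = line.strip()
--         if line.startswith("interface:"):
--             info["interface"] = line.split(":", 1)[1].strip()
--         elif line.startswith("gateway:"):
--             info["gateway"] = line.split(":", 1)[1].strip()
--         elif line.startswith("flags:"):
--             info["flags"] = line.split(":", 1)[1].strip()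
--     return info
-- ===== SOURCE B (Python) =====
-- def _parse_route_get_macos(output):
--     """Parse macOS `route get` output to extract interface and gateway."""
--     table = {}
--     for line in output.splitlines():
--         line = line.strip()
--         key, sep, value = line.partition(":")
--         if sep:
--             table[key] = value.strip()
--     return {
--         "interface": table.get("interface"),
--         "gateway": table.get("gateway"),
--         "flags": table.get("flags"),
--         "raw": output,
--     }
-- ===== Notes on version B (the rewrite author's own statement) =====
-- stated objective: alternative
-- what changed: B replaces A's three prefix-matched elif branches by a generic pass that partitions every line at its first ':' into a key->value table (last occurrence wins) and then extracts the three known keys from that table.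
import Mathlib
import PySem

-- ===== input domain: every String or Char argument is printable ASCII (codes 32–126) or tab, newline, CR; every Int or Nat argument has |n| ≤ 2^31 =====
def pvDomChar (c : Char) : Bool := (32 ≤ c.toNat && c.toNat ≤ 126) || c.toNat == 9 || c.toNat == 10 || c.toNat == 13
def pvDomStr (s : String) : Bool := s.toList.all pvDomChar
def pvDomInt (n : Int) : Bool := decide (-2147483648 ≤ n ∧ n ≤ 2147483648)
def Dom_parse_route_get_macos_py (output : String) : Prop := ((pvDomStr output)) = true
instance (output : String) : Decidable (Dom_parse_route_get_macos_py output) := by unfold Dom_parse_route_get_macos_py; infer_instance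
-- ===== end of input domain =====

-- B replaces A's three prefix-tested elif branches by one generic key→value table pass
-- (split each line at its first ':', last occurrence wins) plus a fixed three-key extraction.

-- ===== PORT A =====
-- line.split(":", 1)[1].strip() — the .getD defaults are unreachable: the separator ":" is
-- nonempty and the caller only evaluates this when line starts with "<key>:", so index 1 exists.
def pvValA (line : String) : String :=
  PySem.Str.strip (PySem.List.pyGetD ((PySem.Str.splitMax? line ":" 1).getD []) 1 "")

def parse_route_get_macos_py (output : String) : List (String × Option String) :=
  let info : PySem.Dict String (Option String) :=
    PySem.Dict.ofList [("interface", none), ("gateway", none), ("flags", none), ("raw", some output)]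
  ((PySem.Str.splitlines output).foldl (fun info line =>
    let line := PySem.Str.strip line
    if PySem.Str.startswith line "interface:" then
      info.insert "interface" (some (pvValA line))
    else if PySem.Str.startswith line "gateway:" then
      info.insert "gateway" (some (pvValA line))
    else if PySem.Str.startswith line "flags:" then
      info.insert "flags" (some (pvValA line))
    else info) info).items

-- ===== PORT B =====
-- str.partition(":") is ported by hand over the char list (exact: split at the FIRST ':';
-- when ':' is absent Python's partition returns an empty sep and Source B skips the line).
def parse_route_get_macos_py_alt (output : String) : List (String × Option String) :=
  let table : PySem.Dict String String :=
    (PySem.Str.splitlines output).foldl (fun t line =>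
      let cs := (PySem.Str.strip line).toList
      if cs.contains ':' then
        t.insert (String.ofList (cs.takeWhile (· != ':')))
                 (PySem.Str.strip (String.ofList ((cs.dropWhile (· != ':')).tail)))
      else t) PySem.Dict.empty
  [("interface", table.get? "interface"), ("gateway", table.get? "gateway"),
   ("flags", table.get? "flags"), ("raw", some output)]

-- ===== PRECONDITION & SPEC =====
def Spec_parse_route_get_macos_py (output : String) (out : List (String × Option String)) : Prop := out = parse_route_get_macos_py_alt output
instance (output : String) (out : List (String × Option String)) : Decidable (Spec_parse_route_get_macos_py output out) := by unfold Spec_parse_route_get_macos_py; infer_instance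

-- ===== CLAIM (what is proved, stated in full; the proofs are below) =====
def Claim_equal_parse_route_get_macos_py : Prop := ∀ (output : String), Dom_parse_route_get_macos_py output → Spec_parse_route_get_macos_py output (parse_route_get_macos_py output)

-- ===== LEMMAS AND PROOFS =====

-- A's per-line step and B's per-line step, named for the induction (definitionally the
-- lambdas of the two ports).
def pvStepA (info : PySem.Dict String (Option String)) (line : String) : PySem.Dict String (Option String) :=
  let line := PySem.Str.strip line
  if PySem.Str.startswith line "interface:" then
    info.insert "interface" (some (pvValA line))
  else if PySem.Str.startswith line "gateway:" then
    info.insert "gateway" (some (pvValA line))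
  else if PySem.Str.startswith line "flags:" then
    info.insert "flags" (some (pvValA line))
  else info

def pvStepB (t : PySem.Dict String String) (line : String) : PySem.Dict String String :=
  let cs := (PySem.Str.strip line).toList
  if cs.contains ':' then
    t.insert (String.ofList (cs.takeWhile (· != ':')))
             (PySem.Str.strip (String.ofList ((cs.dropWhile (· != ':')).tail)))
  else t

-- the invariant shape of A's dict: the four original keys, in place, raw fixed
def pvDict4 (i g f : Option String) (out : String) : PySem.Dict String (Option String) :=
  PySem.Dict.mk [("interface", i), ("gateway", g), ("flags", f), ("raw", some out)]

-- decomposition of a char list at its first ':'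
theorem pvDecomp (cs : List Char) (h : cs.contains ':' = true) :
    cs = cs.takeWhile (· != ':') ++ ':' :: (cs.dropWhile (· != ':')).tail := by
  have hd : cs.dropWhile (· != ':') ≠ [] := by
    intro hnil
    rw [List.dropWhile_eq_nil_iff] at hnil
    simp at h
    have := hnil ':' h
    simp at this
  obtain ⟨a, t, he⟩ := List.exists_cons_of_ne_nil hd
  have hhead := List.head_dropWhile_not (p := (· != ':')) (l := cs) hd
  simp only [he, List.head_cons] at hhead
  have ha : a = ':' := by simpa using hhead
  conv_lhs => rw [← List.takeWhile_append_dropWhile (p := (· != ':')) (l := cs)]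
  rw [he, ha]
  simp

theorem pvColonFreeTake (cs : List Char) : ':' ∉ cs.takeWhile (· != ':') := by
  intro hm
  have := List.mem_takeWhile_imp hm
  simp at this

-- split(":", 1) on key ++ ':' :: rest with a colon-free key: the fuel-based go loop
theorem pvGoZero (fuel : Nat) (rest : List Char) (acc : List (List Char)) :
    PySem.Chars.splitOnMax.go [':'] fuel 0 rest [] acc = (rest :: acc).reverse := by
  cases fuel with
  | zero => simp [PySem.Chars.splitOnMax.go]
  | succ f => cases rest <;> simp [PySem.Chars.splitOnMax.go]

theorem pvGoKey (key : List Char) (hk : ':' ∉ key) :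
    ∀ (fuel : Nat) (rest cur : List Char) (acc : List (List Char)),
    key.length + 1 ≤ fuel →
    PySem.Chars.splitOnMax.go [':'] fuel 1 (key ++ ':' :: rest) cur acc
      = (rest :: (cur.reverse ++ key) :: acc).reverse := by
  induction key with
  | nil =>
    intro fuel rest cur acc hf
    match fuel, hf with
    | f + 1, _ =>
      simp [PySem.Chars.splitOnMax.go, List.isPrefixOf, pvGoZero]
  | cons c key ih =>
    intro fuel rest cur acc hf
    match fuel, hf with
    | f + 1, hf =>
      simp only [List.mem_cons, not_or] at hk
      have hcc : (':' == c) = false := by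
        simp only [beq_eq_false_iff_ne, ne_eq]; exact hk.1
      simp only [List.cons_append, PySem.Chars.splitOnMax.go, List.isPrefixOf, hcc,
        Bool.false_and, Bool.false_eq_true, if_false]
      rw [ih hk.2 f rest (c :: cur) acc (by simpa using hf)]
      simp

theorem pvSplitColon (key rest : List Char) (hk : ':' ∉ key) :
    PySem.Chars.splitOnMax (key ++ ':' :: rest) [':'] 1 = [key, rest] := by
  rw [PySem.Chars.splitOnMax]
  rw [if_neg (by omega)]
  simp only [Int.toNat_one]
  rw [pvGoKey key hk _ rest [] [] (by simp)]
  simp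

theorem pvTakeKey (key u : List Char) (hk : ':' ∉ key) :
    (key ++ ':' :: u).takeWhile (· != ':') = key := by
  induction key with
  | nil => simp
  | cons c k ih =>
    simp only [List.mem_cons, not_or] at hk
    have : (c != ':') = true := by simp; exact fun h => hk.1 h.symm
    simp [this, ih hk.2]

theorem pvValA_eq (s : String) (key rest : List Char) (hk : ':' ∉ key)
    (h : s.toList = key ++ ':' :: rest) :
    pvValA s = PySem.Str.strip (String.ofList rest) := by
  rw [pvValA, PySem.Str.splitMax?, h]
  have : (":" : String).toList = [':'] := by decide
  rw [this, PySem.Chars.splitMax?]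
  simp [pvSplitColon key rest hk, PySem.List.pyGetD, PySem.List.pyIdx?, PySem.List.pyGet?]

-- startswith (key ++ ":") characterised through the first-colon decomposition
theorem pvStartsIff (s : String) (key : List Char) (hk : ':' ∉ key) :
    PySem.Str.startswith s (String.ofList (key ++ [':'])) = true ↔
      s.toList.contains ':' = true ∧ s.toList.takeWhile (· != ':') = key := by
  simp only [PySem.Str.startswith_eq, PySem.Chars.startswith, String.toList_ofList]
  constructor
  · intro h
    rw [List.isPrefixOf_iff_prefix] at h
    obtain ⟨u, hu⟩ := h
    rw [List.append_assoc, List.singleton_append] at hu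
    refine ⟨?_, ?_⟩
    · simp [← hu]
    · rw [← hu, pvTakeKey key u hk]
  · rintro ⟨hc, hK⟩
    have hdec := pvDecomp s.toList hc
    rw [hK] at hdec
    rw [List.isPrefixOf_iff_prefix]
    exact ⟨(s.toList.dropWhile (· != ':')).tail,
      by rw [List.append_assoc, List.singleton_append, ← hdec]⟩

theorem pvOfToList (key : List Char) (k : String) (h : String.ofList key = k) : key = k.toList := by
  rw [← h, String.toList_ofList]

theorem pvIns1 (i g f v : Option String) (out : String) :
    (pvDict4 i g f out).insert "interface" v = pvDict4 v g f out := rfl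
theorem pvIns2 (i g f v : Option String) (out : String) :
    (pvDict4 i g f out).insert "gateway" v = pvDict4 i v f out := rfl
theorem pvIns3 (i g f v : Option String) (out : String) :
    (pvDict4 i g f out).insert "flags" v = pvDict4 i g v out := rfl

theorem pvDict4_ext {i g f i' g' f' : Option String} {out : String}
    (h1 : i = i') (h2 : g = g') (h3 : f = f') : pvDict4 i g f out = pvDict4 i' g' f' out := by
  rw [h1, h2, h3]

-- one line: A's step on the invariant shape is B's step read back through the three lookups
theorem pvStep (line : String) (t : PySem.Dict String String) (out : String) :
    pvStepA (pvDict4 (t.get? "interface") (t.get? "gateway") (t.get? "flags") out) line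
      = pvDict4 ((pvStepB t line).get? "interface") ((pvStepB t line).get? "gateway")
          ((pvStepB t line).get? "flags") out := by
  have e1 : ("interface:" : String) = String.ofList ("interface".toList ++ [':']) := rfl
  have e2 : ("gateway:" : String) = String.ofList ("gateway".toList ++ [':']) := rfl
  have e3 : ("flags:" : String) = String.ofList ("flags".toList ++ [':']) := rfl
  set s := PySem.Str.strip line with hs
  by_cases hc : s.toList.contains ':' = true
  · -- line has a colon: decompose at the first one
    set K := s.toList.takeWhile (· != ':') with hK
    set R := (s.toList.dropWhile (· != ':')).tail with hR
    have hdec : s.toList = K ++ ':' :: R := pvDecomp s.toList hc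
    have hKf : ':' ∉ K := pvColonFreeTake s.toList
    have hB : pvStepB t line = t.insert (String.ofList K)
        (PySem.Str.strip (String.ofList R)) := by
      rw [pvStepB]; simp only [← hs, ← hK, ← hR, hc, if_true]
    by_cases h1 : K = "interface".toList
    · have hsw : PySem.Str.startswith s "interface:" = true := by
        rw [e1]; exact (pvStartsIff s _ (by decide)).2 ⟨hc, h1⟩
      rw [pvStepA]
      simp only [← hs, hsw, if_true]
      rw [pvValA_eq s K R hKf hdec, hB]
      rw [h1]
      have ho : String.ofList ("interface".toList) = "interface" := rfl
      rw [ho, pvIns1]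
      exact pvDict4_ext (by rw [PySem.Dict.get?_insert]; simp)
        (by rw [PySem.Dict.get?_insert]; simp)
        (by rw [PySem.Dict.get?_insert]; simp)
    · have hsw1 : PySem.Str.startswith s "interface:" = false := by
        rw [e1]; apply Bool.eq_false_iff.mpr; intro hx
        exact h1 ((pvStartsIff s _ (by decide)).1 hx).2
      by_cases h2 : K = "gateway".toList
      · have hsw : PySem.Str.startswith s "gateway:" = true := by
          rw [e2]; exact (pvStartsIff s _ (by decide)).2 ⟨hc, h2⟩
        rw [pvStepA]
        simp only [← hs, hsw1, hsw, Bool.false_eq_true, if_false, if_true]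
        rw [pvValA_eq s K R hKf hdec, hB, h2]
        have ho : String.ofList ("gateway".toList) = "gateway" := rfl
        rw [ho, pvIns2]
        exact pvDict4_ext (by rw [PySem.Dict.get?_insert]; simp)
          (by rw [PySem.Dict.get?_insert]; simp)
          (by rw [PySem.Dict.get?_insert]; simp)
      · have hsw2 : PySem.Str.startswith s "gateway:" = false := by
          rw [e2]; apply Bool.eq_false_iff.mpr; intro hx
          exact h2 ((pvStartsIff s _ (by decide)).1 hx).2
        by_cases h3 : K = "flags".toList
        · have hsw : PySem.Str.startswith s "flags:" = true := by
            rw [e3]; exact (pvStartsIff s _ (by decide)).2 ⟨hc, h3⟩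
          rw [pvStepA]
          simp only [← hs, hsw1, hsw2, hsw, Bool.false_eq_true, if_false, if_true]
          rw [pvValA_eq s K R hKf hdec, hB, h3]
          have ho : String.ofList ("flags".toList) = "flags" := rfl
          rw [ho, pvIns3]
          exact pvDict4_ext (by rw [PySem.Dict.get?_insert]; simp)
            (by rw [PySem.Dict.get?_insert]; simp)
            (by rw [PySem.Dict.get?_insert]; simp)
        · have hsw3 : PySem.Str.startswith s "flags:" = false := by
            rw [e3]; apply Bool.eq_false_iff.mpr; intro hx
            exact h3 ((pvStartsIff s _ (by decide)).1 hx).2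
          rw [pvStepA]
          simp only [← hs, hsw1, hsw2, hsw3, Bool.false_eq_true, if_false]
          rw [hB]
          refine pvDict4_ext ?_ ?_ ?_ <;> rw [PySem.Dict.get?_insert] <;>
            rw [if_neg (fun hx => ?_)]
          · exact h1 (pvOfToList K "interface" hx.symm)
          · exact h2 (pvOfToList K "gateway" hx.symm)
          · exact h3 (pvOfToList K "flags" hx.symm)
  · -- no colon in the stripped line: neither side changes its state
    have hB : pvStepB t line = t := by
      rw [pvStepB]; simp only [← hs]
      rw [if_neg hc]
    have hsw : ∀ (key : List Char), ':' ∉ key →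
        PySem.Str.startswith s (String.ofList (key ++ [':'])) = false := by
      intro key hkf
      apply Bool.eq_false_iff.mpr; intro hx
      exact hc ((pvStartsIff s key hkf).1 hx).1
    rw [pvStepA]
    simp only [← hs, e1, e2, e3]
    rw [hsw "interface".toList (by decide), hsw "gateway".toList (by decide),
      hsw "flags".toList (by decide), hB]
    simp

theorem pvFold (lines : List String) : ∀ (t : PySem.Dict String String) (out : String),
    lines.foldl pvStepA (pvDict4 (t.get? "interface") (t.get? "gateway") (t.get? "flags") out)
      = pvDict4 ((lines.foldl pvStepB t).get? "interface") ((lines.foldl pvStepB t).get? "gateway")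
          ((lines.foldl pvStepB t).get? "flags") out := by
  induction lines with
  | nil => intro t out; rfl
  | cons l ls ih =>
    intro t out
    rw [List.foldl_cons, List.foldl_cons, pvStep l t out]
    exact ih (pvStepB t l) out

-- ===== VERDICT (by name: the statement is the Claim_ definition above) =====
theorem parse_route_get_macos_py_spec : Claim_equal_parse_route_get_macos_py := by
  intro output _
  unfold Spec_parse_route_get_macos_py
  have hA : parse_route_get_macos_py output
      = ((PySem.Str.splitlines output).foldl pvStepA
          (pvDict4 (PySem.Dict.empty.get? "interface") (PySem.Dict.empty.get? "gateway")
            (PySem.Dict.empty.get? "flags") output)).items := rfl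
  rw [hA, pvFold]
  rfl
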